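-- pv_equiv track=rewrite | github.com/KenZ34601/Small-Projects | 2PersonGame/payoff_solver.py | solve_pure_strategy_colplayer
-- ===== SOURCE A (Python) =====
-- def solve_pure_strategy_colplayer(a):
--     n = len(a)
--     p = [0] * n
--     q = 1
--     v = max(a)
--     p_index = [i for i, x in enumerate(a) if x == v]
--     p[p_index[0]] = 1
--     return p, q, v
-- ===== SOURCE B (Python) =====
-- def solve_pure_strategy_colplayer(a):
--     v = a[0]
--     best = 0
--     for i, x in enumerate(a[1:], 1):
--         if x > v:
--             v = x
--             best = i
--     p = [0] * len(a)
--     p[best] = 1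
--     return p, 1, v
-- ===== Notes on version B (the rewrite author's own statement) =====
-- stated objective: alternative
-- what changed: Replaces the two-pass max(a) + full argmax-list comprehension with a single scan that keeps the running maximum and the index of its first occurrence (strict '>' update), then sets that one index to 1.
import Mathlib
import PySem

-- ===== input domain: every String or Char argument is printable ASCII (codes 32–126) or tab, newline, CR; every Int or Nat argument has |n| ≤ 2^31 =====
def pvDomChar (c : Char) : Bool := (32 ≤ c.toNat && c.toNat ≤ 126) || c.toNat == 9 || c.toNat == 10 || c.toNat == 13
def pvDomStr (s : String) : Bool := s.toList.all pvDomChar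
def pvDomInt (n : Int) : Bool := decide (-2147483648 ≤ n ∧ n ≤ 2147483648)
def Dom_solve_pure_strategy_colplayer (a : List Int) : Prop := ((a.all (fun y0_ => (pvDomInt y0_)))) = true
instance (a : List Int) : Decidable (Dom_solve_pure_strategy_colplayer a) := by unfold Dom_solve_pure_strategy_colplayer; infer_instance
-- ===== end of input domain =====

-- B replaces A's two passes (max(a), then the list comprehension of all argmax indices)
-- by one scan keeping the running maximum and the index of its first occurrence; same results, same O(n) cost ("alternative").


-- ===== PORT A =====
def solve_pure_strategy_colplayer (a : List Int) : List Int × Int × Int :=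
  let n := a.length
  let p := List.replicate n (0:Int)
  let q : Int := 1
  match PySem.List.max? a (fun y => y) with
  | none => (p, q, 0)  -- max([]) raises ValueError; outside Pre_
  | some v =>
    let p_index := ((PySem.List.enumerate a 0).filter (fun ix => ix.2 == v)).map (fun ix => ix.1)
    match p_index with
    | [] => (p, q, v)  -- never reached: v ∈ a, so p_index is nonempty
    | j :: _ => (p.set j.toNat 1, q, v)

-- ===== PORT B =====
-- the scan: running maximum v, index best of its first occurrence, current index i
def pvGo : List Int → Int → Nat → Nat → Int × Nat
  | [], v, best, _ => (v, best)
  | x :: t, v, best, i => if x > v then pvGo t x i (i+1) else pvGo t v best (i+1)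

def solve_pure_strategy_colplayer_alt (a : List Int) : List Int × Int × Int :=
  match a with
  | [] => ([], 1, 0)  -- Python B raises IndexError on a[0]; outside Pre_
  | x :: xs =>
    let r := pvGo xs x 0 1
    let p := (List.replicate a.length (0:Int)).set r.2 1
    (p, 1, r.1)

-- ===== PRECONDITION & SPEC =====
-- Pre_ excludes only the empty list, on which both Pythons raise (A: ValueError from max, B: IndexError).
def Pre_solve_pure_strategy_colplayer (a : List Int) : Prop := a ≠ []
instance (a : List Int) : Decidable (Pre_solve_pure_strategy_colplayer a) := by unfold Pre_solve_pure_strategy_colplayer; infer_instance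
def pvWitness_solve_pure_strategy_colplayer : List Int := [3, 7, 7, 1]

def Spec_solve_pure_strategy_colplayer (a : List Int) (out : List Int × Int × Int) : Prop := out = solve_pure_strategy_colplayer_alt a
instance (a : List Int) (out : List Int × Int × Int) : Decidable (Spec_solve_pure_strategy_colplayer a out) := by unfold Spec_solve_pure_strategy_colplayer; infer_instance

-- ===== CLAIM (what is proved, stated in full; the proofs are below) =====
def Claim_equal_solve_pure_strategy_colplayer : Prop := ∀ (a : List Int), Dom_solve_pure_strategy_colplayer a → Pre_solve_pure_strategy_colplayer a → Spec_solve_pure_strategy_colplayer a (solve_pure_strategy_colplayer a)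

-- ===== LEMMAS AND PROOFS =====

-- the scan returns the running maximum and the (offset) index of its first occurrence
theorem pvGo_spec (ys : List Int) (v : Int) (b i : Nat) :
    pvGo ys v b i =
      (ys.foldl max v,
       if ys.foldl max v ≤ v then b else i + List.idxOf (ys.foldl max v) ys) := by
  induction ys generalizing v b i with
  | nil => simp [pvGo]
  | cons y t ih =>
    simp only [pvGo, List.foldl_cons]
    by_cases hyv : y > v
    · rw [if_pos hyv, max_eq_right (le_of_lt hyv), ih y i (i+1)]
      have hy : y ≤ t.foldl max y := (PySem.List.le_foldl_max t y).1
      by_cases hM : t.foldl max y ≤ y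
      · have hMy : t.foldl max y = y := le_antisymm hM hy
        have hnv : ¬ t.foldl max y ≤ v := by rw [hMy]; exact not_le.mpr hyv
        rw [if_pos hM, if_neg hnv]
        refine Prod.ext rfl ?_
        simp [hMy, List.idxOf_cons]
      · have hne : (y == t.foldl max y) = false := by
          simp only [beq_eq_false_iff_ne, ne_eq]
          exact fun h => hM (le_of_eq h.symm)
        have hMv : ¬ t.foldl max y ≤ v := fun h => hM (le_trans h (le_of_lt hyv))
        have hidx : List.idxOf (t.foldl max y) (y :: t) = List.idxOf (t.foldl max y) t + 1 := by
          rw [List.idxOf_cons, hne]; rfl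
        rw [if_neg hM, if_neg hMv, hidx]
        refine Prod.ext rfl ?_
        show i + 1 + List.idxOf (t.foldl max y) t = i + (List.idxOf (t.foldl max y) t + 1)
        omega
    · push_neg at hyv
      rw [if_neg (not_lt.mpr hyv), max_eq_left hyv, ih v b (i+1)]
      by_cases hM : t.foldl max v ≤ v
      · rw [if_pos hM, if_pos hM]
      · have hne : (y == t.foldl max v) = false := by
          simp only [beq_eq_false_iff_ne, ne_eq]
          exact fun h => hM (h ▸ hyv)
        have hidx : List.idxOf (t.foldl max v) (y :: t) = List.idxOf (t.foldl max v) t + 1 := by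
          rw [List.idxOf_cons, hne]; rfl
        rw [if_neg hM, if_neg hM, hidx]
        refine Prod.ext rfl ?_
        show i + 1 + List.idxOf (t.foldl max v) t = i + (List.idxOf (t.foldl max v) t + 1)
        omega

-- A's filtered enumerate list starts with the (offset) first index of M
theorem pvFilt_head (l : List Int) (s M : Int) (h : M ∈ l) :
    ∃ rest, (PySem.List.enumerate l s).filter (fun ix => ix.2 == M)
      = (s + (List.idxOf M l : Int), M) :: rest := by
  induction l generalizing s with
  | nil => cases h
  | cons y t ih =>
    rw [PySem.List.enumerate_cons]
    by_cases hy : y = M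
    · subst hy
      refine ⟨(PySem.List.enumerate t (s+1)).filter (fun ix => ix.2 == y), ?_⟩
      simp [List.filter_cons, List.idxOf_cons]
    · have hM : M ∈ t := by
        cases h with
        | head => exact absurd rfl hy
        | tail _ h => exact h
      obtain ⟨rest, hrest⟩ := ih (s+1) hM
      refine ⟨rest, ?_⟩
      have hbe : (((s, y).2 : Int) == M) = false := by simp [hy]
      simp only [List.filter_cons, hbe, Bool.false_eq_true, if_false]
      rw [hrest]
      have hcast : s + 1 + (List.idxOf M t : Int) = s + (List.idxOf M (y :: t) : Int) := by
        have hb : (y == M) = false := by simp [hy]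
        have hidx : List.idxOf M (y :: t) = List.idxOf M t + 1 := by
          rw [List.idxOf_cons, hb]; rfl
        rw [hidx]
        omega
      rw [hcast]

-- ===== VERDICT (by name: the statement is the Claim_ definition above) =====
theorem solve_pure_strategy_colplayer_spec : Claim_equal_solve_pure_strategy_colplayer := by
  intro a _ hpre
  unfold Spec_solve_pure_strategy_colplayer
  match a with
  | [] => exact absurd rfl hpre
  | x :: xs =>
    set M := xs.foldl max x with hMdef
    have hmem : M ∈ x :: xs := by
      rcases PySem.List.foldl_max_mem xs x with h | h
      · exact h ▸ List.mem_cons_self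
      · exact List.mem_cons_of_mem _ h
    obtain ⟨rest, hrest⟩ := pvFilt_head (x :: xs) 0 M hmem
    unfold solve_pure_strategy_colplayer solve_pure_strategy_colplayer_alt
    rw [PySem.List.max?_id_cons, ← hMdef]
    simp only [hrest, List.map_cons]
    rw [pvGo_spec, ← hMdef]
    have hx : x ≤ M := (PySem.List.le_foldl_max xs x).1
    have hidx : (if M ≤ x then 0 else 1 + List.idxOf M xs) = List.idxOf M (x :: xs) := by
      by_cases hMx : M ≤ x
      · have : x = M := le_antisymm hx hMx
        simp [hMx, List.idxOf_cons, this]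
      · have hne : x ≠ M := fun h => hMx (le_of_eq h.symm)
        simp [hMx, List.idxOf_cons, hne]; omega
    by_cases hMx : M ≤ x
    · simp only [if_pos hMx] at hidx ⊢
      rw [← hidx]
      simp
    · simp only [if_neg hMx] at hidx ⊢
      rw [← hidx]
      have hc : ((0:Int) + ((1 + List.idxOf M xs : Nat) : Int)).toNat = 1 + List.idxOf M xs := by omega
      push_cast at hc ⊢
      rw [hc]
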